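-- pv_equiv track=rewrite | github.com/DMiC-Lab-HFUT/DAGKT | data_process.py | build_q_list1
-- ===== SOURCE A (Python) =====
-- def build_q_list1(q_matrix, question_num, skill_num):#生成对应关系列表
--     qs_adj_list = []
--     for i in range(skill_num):  # 确定技巧连接的问题
--         adj_list = []
--         for j in range(question_num):
--             if q_matrix[j][i] == 1:
--                 adj_list.append(j + skill_num)
--         qs_adj_list.append(adj_list)
--     for i in range(question_num):  # 确定问题连接的技巧
--         adj_list = []
--         for j in range(skill_num):
--             if q_matrix[i][j] == 1:
--                 adj_list.append(j)
--         qs_adj_list.append(adj_list)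
--
--     return qs_adj_list
-- ===== SOURCE B (Python) =====
-- def build_q_list1(q_matrix, question_num, skill_num):
--     # single pass over the matrix filling a pre-allocated adjacency table
--     qs_adj_list = [[] for _ in range(skill_num)] + [[] for _ in range(question_num)]
--     for i in range(question_num):
--         for j in range(skill_num):
--             if q_matrix[i][j] == 1:
--                 qs_adj_list[skill_num + i].append(j)
--                 qs_adj_list[j].append(i + skill_num)
--     return qs_adj_list
-- ===== Notes on version B (the rewrite author's own statement) =====
-- stated objective: alternative
-- what changed: B replaces A's two separate full scans of the matrix (one per skill building skill->question lists, one per question building question->skill lists) by a single nested pass that pre-allocates all skill_num+question_num adjacency lists and, on each 1-entry, appends to both the skill list and the question list at once.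
import Mathlib
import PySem

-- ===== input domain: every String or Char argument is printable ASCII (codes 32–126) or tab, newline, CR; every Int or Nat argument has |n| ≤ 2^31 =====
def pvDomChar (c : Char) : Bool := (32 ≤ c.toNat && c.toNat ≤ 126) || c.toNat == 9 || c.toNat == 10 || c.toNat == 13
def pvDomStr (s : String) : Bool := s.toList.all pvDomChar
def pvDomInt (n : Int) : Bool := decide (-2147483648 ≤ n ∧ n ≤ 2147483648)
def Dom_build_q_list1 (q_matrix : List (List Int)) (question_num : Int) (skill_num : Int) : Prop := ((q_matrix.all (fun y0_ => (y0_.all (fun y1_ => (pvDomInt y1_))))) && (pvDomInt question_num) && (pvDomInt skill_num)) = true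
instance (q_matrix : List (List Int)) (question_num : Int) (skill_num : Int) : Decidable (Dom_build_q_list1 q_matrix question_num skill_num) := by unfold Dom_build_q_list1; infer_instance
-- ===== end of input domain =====

-- B builds the whole adjacency table in ONE pass over the matrix (pre-allocated lists, two
-- appends per 1-entry) instead of A's two separate full scans; objective: alternative decomposition.


-- ===== PORT A =====
-- q_matrix[j][i] is ported as pyGetD (total form); Pre_ below admits exactly the inputs
-- on which every access is in range, i.e. on which the Python returns.
def build_q_list1 (q_matrix : List (List Int)) (question_num : Int) (skill_num : Int) : List (List Int) :=
  let l1 := (PySem.List.pyRange 0 skill_num 1).foldl (fun qs i =>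
      qs ++ [(PySem.List.pyRange 0 question_num 1).foldl (fun al j =>
        if PySem.List.pyGetD (PySem.List.pyGetD q_matrix j []) i 0 == 1 then al ++ [j + skill_num] else al) []]) []
  (PySem.List.pyRange 0 question_num 1).foldl (fun qs i =>
      qs ++ [(PySem.List.pyRange 0 skill_num 1).foldl (fun al j =>
        if PySem.List.pyGetD (PySem.List.pyGetD q_matrix i []) j 0 == 1 then al ++ [j] else al) []]) l1

-- ===== PORT B =====
-- qs_adj_list[t].append(x)
def pyAppendAt (qs : List (List Int)) (t : Int) (x : Int) : List (List Int) :=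
  PySem.List.pySetD qs t (PySem.List.pyGetD qs t [] ++ [x])

def build_q_list1_alt (q_matrix : List (List Int)) (question_num : Int) (skill_num : Int) : List (List Int) :=
  let init := (PySem.List.pyRange 0 skill_num 1).map (fun _ => ([] : List Int))
      ++ (PySem.List.pyRange 0 question_num 1).map (fun _ => ([] : List Int))
  (PySem.List.pyRange 0 question_num 1).foldl (fun qs i =>
    (PySem.List.pyRange 0 skill_num 1).foldl (fun qs j =>
      if PySem.List.pyGetD (PySem.List.pyGetD q_matrix i []) j 0 == 1 then
        pyAppendAt (pyAppendAt qs (skill_num + i) j) j (i + skill_num)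
      else qs) qs) init

-- ===== PRECONDITION & SPEC =====
-- Pre_: exactly the inputs on which Python A returns (no IndexError): either no matrix cell
-- is read (one of the two counts is ≤ 0) or the first question_num rows exist and are ≥ skill_num wide.
def Pre_build_q_list1 (q_matrix : List (List Int)) (question_num : Int) (skill_num : Int) : Prop :=
  question_num ≤ 0 ∨ skill_num ≤ 0 ∨
    (question_num ≤ (q_matrix.length : Int) ∧
      ∀ row ∈ q_matrix.take question_num.toNat, skill_num ≤ (row.length : Int))
instance (q_matrix : List (List Int)) (question_num : Int) (skill_num : Int) : Decidable (Pre_build_q_list1 q_matrix question_num skill_num) := by unfold Pre_build_q_list1; infer_instance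

def pvWitness_build_q_list1 : List (List Int) × Int × Int := ([[1, 0], [0, 1], [1, 1]], 3, 2)

def Spec_build_q_list1 (q_matrix : List (List Int)) (question_num : Int) (skill_num : Int) (out : List (List Int)) : Prop := out = build_q_list1_alt q_matrix question_num skill_num
instance (q_matrix : List (List Int)) (question_num : Int) (skill_num : Int) (out : List (List Int)) : Decidable (Spec_build_q_list1 q_matrix question_num skill_num out) := by unfold Spec_build_q_list1; infer_instance

-- ===== CLAIM (what is proved, stated in full; the proofs are below) =====
def Claim_equal_build_q_list1 : Prop := ∀ (q_matrix : List (List Int)) (question_num : Int) (skill_num : Int), Dom_build_q_list1 q_matrix question_num skill_num → Pre_build_q_list1 q_matrix question_num skill_num → Spec_build_q_list1 q_matrix question_num skill_num (build_q_list1 q_matrix question_num skill_num)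

-- ===== LEMMAS AND PROOFS =====

-- the matrix cell both programs read (i = question, j = skill), as the ports read it
def gCell (qm : List (List Int)) (i j : Nat) : Int :=
  PySem.List.pyGetD (PySem.List.pyGetD qm (i : Int) []) (j : Int) 0

-- A's second-pass list for question i
def rowL (qm : List (List Int)) (S : Nat) (i : Nat) : List Int :=
  ((List.range S).filter (fun j => gCell qm i j == 1)).map (fun j : Nat => (j : Int))

-- A's first-pass list for skill j, restricted to questions < k
def colL (qm : List (List Int)) (sn : Int) (k : Nat) (j : Nat) : List Int :=
  ((List.range k).filter (fun i => gCell qm i j == 1)).map (fun i : Nat => ((i : Int) + sn))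

theorem A_char (qm : List (List Int)) (qn sn : Int) :
    build_q_list1 qm qn sn =
      (List.range sn.toNat).map (fun j => colL qm sn qn.toNat j)
        ++ (List.range qn.toNat).map (fun i => rowL qm sn.toNat i) := by
  simp only [build_q_list1, PySem.List.pyRange_zero, List.foldl_map,
    PySem.List.foldl_append_if, PySem.List.foldl_append_singleton_eq_map, List.nil_append]
  simp only [colL, rowL, gCell]

theorem appendAt_nat (qs : List (List Int)) (j : Nat) (x : Int) :
    pyAppendAt qs (j : Int) x = qs.set j (qs.getD j [] ++ [x]) := by
  simp [pyAppendAt]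

theorem appendAt_left (xs ys : List (List Int)) (j : Nat) (x : Int) (hj : j < xs.length) :
    pyAppendAt (xs ++ ys) (j : Int) x = pyAppendAt xs (j : Int) x ++ ys := by
  rw [appendAt_nat, appendAt_nat]
  rw [List.getD_append _ _ _ _ hj, List.set_append_left _ _ hj]

theorem appendAt_head (xs : List (List Int)) (cur : List Int) (rest : List (List Int)) (x : Int) :
    pyAppendAt (xs ++ cur :: rest) (xs.length : Int) x = xs ++ (cur ++ [x]) :: rest := by
  rw [appendAt_nat]
  rw [List.getD_eq_getElem?_getD, List.getElem?_append_right (Nat.le_refl _)]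
  simp [List.set_append_right _ _ (Nat.le_refl xs.length)]

theorem appendAt_map_range (P : Nat → List Int) (S j : Nat) (x : Int) (hj : j < S) :
    pyAppendAt ((List.range S).map P) (j : Int) x
      = (List.range S).map (fun j' => if j' = j then P j' ++ [x] else P j') := by
  rw [appendAt_nat]
  apply List.ext_getElem
  · simp
  · intro n h1 h2
    simp only [List.length_set, List.length_map, List.length_range] at h1
    rw [List.getElem_set]
    simp only [List.getElem_map, List.getElem_range]
    split_ifs with h h' h'
    · rw [h'] at h ⊢
      rw [List.getD_eq_getElem?_getD]
      simp [hj]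
    · omega
    · omega
    · rfl

theorem inner_fold (qm : List (List Int)) (sn : Int) (S : Nat) (hS : sn = (S : Int)) (k : Nat)
    (P : Nat → List Int) (D : List (List Int)) (cur : List Int) (rest : List (List Int))
    (hD : D.length = k) (m : Nat) (hm : m ≤ S) :
    (List.range m).foldl (fun qs j =>
        if gCell qm k j == 1 then
          pyAppendAt (pyAppendAt qs (sn + (k : Int)) (j : Int)) (j : Int) ((k : Int) + sn)
        else qs)
      ((List.range S).map P ++ D ++ cur :: rest)
    = (List.range S).map (fun j => P j ++ if j < m ∧ gCell qm k j == 1 then [(k : Int) + sn] else [])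
        ++ D ++ (cur ++ ((List.range m).filter (fun j => gCell qm k j == 1)).map (fun j : Nat => (j : Int))) :: rest := by
  subst hS
  induction m with
  | zero => simp
  | succ m ih =>
    rw [List.range_succ, List.foldl_append, ih (Nat.le_of_succ_le hm), List.foldl_cons, List.foldl_nil]
    by_cases hc : gCell qm k m == 1
    · rw [if_pos hc]
      have e1 : (S : Int) + (k : Int) = (((List.range S).map (fun j => P j ++ if j < m ∧ gCell qm k j == 1 then [(k : Int) + (S : Int)] else []) ++ D).length : Int) := by
        simp only [List.length_append, List.length_map, List.length_range, hD]
        push_cast; ring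
      rw [e1, appendAt_head, List.append_assoc,
        appendAt_left _ _ _ _ (by simp; omega),
        appendAt_map_range _ _ _ _ (by omega), ← List.append_assoc]
      congr 1
      · congr 1
        apply List.map_congr_left
        intro a ha
        rw [List.mem_range] at ha
        by_cases ham : a = m
        · subst ham; simp [hc]
        · by_cases hg : gCell qm k a == 1
          · simp [hg, ham, show (a < m) ↔ (a < m + 1) from by omega]
          · simp [hg, ham]
      · simp [List.filter_append, hc, List.append_assoc]
    · rw [if_neg hc]
      have hfil : List.filter (fun j => gCell qm k j == 1) (List.range m ++ [m]) = List.filter (fun j => gCell qm k j == 1) (List.range m) := by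
        simp [List.filter_append, hc]
      rw [hfil]
      have hmap : ∀ a ∈ List.range S, (P a ++ if a < m ∧ gCell qm k a == 1 then [(k : Int) + (S : Int)] else []) = (P a ++ if a < m + 1 ∧ gCell qm k a == 1 then [(k : Int) + (S : Int)] else []) := by
        intro a ha
        by_cases ham : a = m
        · subst ham; simp [hc]
        · by_cases hg : gCell qm k a == 1
          · simp [hg, show (a < m) ↔ (a < m + 1) from by omega]
          · simp [hg]
      rw [List.map_congr_left hmap]

theorem outer_fold (qm : List (List Int)) (sn : Int) (S Q : Nat)
    (hS : sn = (S : Int)) (k : Nat) (hk : k ≤ Q) :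
    (List.range k).foldl (fun (qs : List (List Int)) (i : Nat) =>
        (PySem.List.pyRange 0 sn 1).foldl (fun qs j =>
          if PySem.List.pyGetD (PySem.List.pyGetD qm (i : Int) []) j 0 == 1 then
            pyAppendAt (pyAppendAt qs (sn + (i : Int)) j) j ((i : Int) + sn)
          else qs) qs)
      ((List.range S).map (fun _ => ([] : List Int)) ++ List.replicate Q ([] : List Int))
    = (List.range S).map (fun j => colL qm sn k j) ++ (List.range k).map (fun i => rowL qm S i)
        ++ List.replicate (Q - k) ([] : List Int) := by
  subst hS
  induction k with
  | zero => simp [colL]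
  | succ k ih =>
    rw [List.range_succ, List.foldl_append, ih (Nat.le_of_succ_le hk), List.foldl_cons, List.foldl_nil]
    rw [PySem.List.pyRange_zero_nat S, List.foldl_map]
    have hrep : List.replicate (Q - k) ([] : List Int) = ([] : List Int) :: List.replicate (Q - (k + 1)) ([] : List Int) := by
      rw [show Q - k = (Q - (k + 1)) + 1 by omega, List.replicate_succ]
    rw [hrep]
    have gdef : ∀ (i j : Nat), PySem.List.pyGetD (PySem.List.pyGetD qm (i : Int) []) ((j : Int)) 0 = gCell qm i j := fun _ _ => rfl
    simp only [gdef]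
    rw [inner_fold qm ((S : Nat) : Int) S rfl k _ _ _ _ (by simp) S (Nat.le_refl S)]
    have hshape : List.map (fun j => colL qm ((S : Nat) : Int) (k + 1) j) (List.range S)
          ++ List.map (fun i => rowL qm S i) (List.range k ++ [k])
          ++ List.replicate (Q - (k + 1)) ([] : List Int)
        = (List.map (fun j => colL qm ((S : Nat) : Int) (k + 1) j) (List.range S)
            ++ List.map (fun i => rowL qm S i) (List.range k))
          ++ (rowL qm S k :: List.replicate (Q - (k + 1)) ([] : List Int)) := by
      simp [List.append_assoc]
    rw [hshape]
    congr 1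
    · congr 1
      apply List.map_congr_left
      intro j hj
      rw [List.mem_range] at hj
      by_cases hg : gCell qm k j == 1
      · simp [colL, List.range_succ, List.filter_append, hg, hj]
      · simp [colL, List.range_succ, List.filter_append, hg, hj]

theorem B_char (qm : List (List Int)) (qn sn : Int) (hsn : 0 ≤ sn) (_hqn : 0 ≤ qn) :
    build_q_list1_alt qm qn sn =
      (List.range sn.toNat).map (fun j => colL qm sn qn.toNat j)
        ++ (List.range qn.toNat).map (fun i => rowL qm sn.toNat i) := by
  unfold build_q_list1_alt
  rw [PySem.List.pyRange_zero qn, List.foldl_map]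
  have h1 : (PySem.List.pyRange 0 sn 1).map (fun _ => ([] : List Int)) = (List.range sn.toNat).map (fun _ => ([] : List Int)) := by
    rw [PySem.List.pyRange_zero sn, List.map_map]; rfl
  have h2 : (List.map (fun k : Nat => ((k : Int))) (List.range qn.toNat)).map (fun _ => ([] : List Int)) = List.replicate qn.toNat ([] : List Int) := by
    rw [List.map_map]
    exact List.eq_replicate_iff.mpr (by simp)
  rw [h1, h2]
  have := outer_fold qm sn sn.toNat qn.toNat (Int.toNat_of_nonneg hsn).symm qn.toNat (Nat.le_refl _)
  rw [this]
  simp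

theorem foldl_self (l : List Int) (init : List (List Int)) :
    l.foldl (fun qs _ => qs) init = init := by
  induction l generalizing init with
  | nil => rfl
  | cons x xs ih => exact ih init

-- ===== VERDICT (by name: the statement is the Claim_ definition above) =====
theorem build_q_list1_spec : Claim_equal_build_q_list1 := by
  intro qm qn sn _ _
  unfold Spec_build_q_list1
  by_cases hqn : 0 ≤ qn
  · by_cases hsn : 0 ≤ sn
    · rw [A_char, B_char qm qn sn hsn hqn]
    · have hnil : PySem.List.pyRange 0 sn 1 = [] := PySem.List.pyRange_one_eq_nil (by omega)
      simp only [build_q_list1, build_q_list1_alt, hnil, List.foldl_nil, List.map_nil,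
        List.nil_append]
      rw [foldl_self]
      simp
  · have hnil : PySem.List.pyRange 0 qn 1 = [] := PySem.List.pyRange_one_eq_nil (by omega)
    simp only [build_q_list1, build_q_list1_alt, hnil, List.foldl_nil, List.map_nil,
      List.append_nil]
    simp
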